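-- pv_equiv track=rewrite | github.com/Valerio1903/Manens_Toolbar | Manens.tab/Revit to Excel.panel/Revit to Excel SPE.pushbutton/script.py | COND_chunk_consecutive_rows
-- ===== SOURCE A (Python) =====
-- def COND_chunk_consecutive_rows(sorted_rows):
--     runs = []
--     if not sorted_rows: return runs
--     start_r = prev_r = sorted_rows[0]
--     for r in sorted_rows[1:]:
--         if r == prev_r + 1:
--             prev_r = r
--         else:
--             runs.append((start_r, prev_r))
--             start_r = prev_r = r
--     runs.append((start_r, prev_r))
--     return runs
-- ===== SOURCE B (Python) =====
-- def COND_chunk_consecutive_rows(sorted_rows):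
--     if not sorted_rows:
--         return []
--     breaks = [(a, b) for a, b in zip(sorted_rows, sorted_rows[1:]) if b != a + 1]
--     starts = [sorted_rows[0]] + [b for _, b in breaks]
--     ends = [a for a, _ in breaks] + [sorted_rows[-1]]
--     return list(zip(starts, ends))
-- ===== Notes on version B (the rewrite author's own statement) =====
-- stated objective: alternative
-- what changed: B replaces A's stateful scan with (start, prev) registers by a staged, data-parallel construction: it finds the break gaps among adjacent pairs (zip of the list with its tail), derives the column of run starts and the column of run ends from those gaps, and zips the two columns.
import Mathlib
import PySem

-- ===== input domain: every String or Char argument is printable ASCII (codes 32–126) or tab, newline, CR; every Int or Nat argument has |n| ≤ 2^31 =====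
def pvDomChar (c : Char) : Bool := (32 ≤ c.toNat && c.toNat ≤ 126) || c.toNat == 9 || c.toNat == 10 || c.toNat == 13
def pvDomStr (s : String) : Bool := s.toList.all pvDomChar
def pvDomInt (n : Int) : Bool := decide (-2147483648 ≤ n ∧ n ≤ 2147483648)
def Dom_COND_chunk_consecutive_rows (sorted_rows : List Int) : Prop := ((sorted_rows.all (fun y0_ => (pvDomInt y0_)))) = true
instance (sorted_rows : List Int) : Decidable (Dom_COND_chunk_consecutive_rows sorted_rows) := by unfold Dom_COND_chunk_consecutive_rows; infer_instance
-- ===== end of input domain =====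

-- B replaces A's stateful scan (start, prev registers, post-loop flush) by a staged
-- construction: filter the break gaps among adjacent pairs, build the start column and
-- the end column from them, and zip the two columns.

-- ===== PORT A =====
-- literal port of A: guard on empty list, fold over the tail with state (runs, start_r, prev_r),
-- then append the pending run.
def COND_chunk_consecutive_rows (sorted_rows : List Int) : List (Int × Int) :=
  match sorted_rows with
  | [] => []
  | x :: rest =>
    let st := rest.foldl (fun (s : List (Int × Int) × Int × Int) r =>
        if r = s.2.2 + 1 then (s.1, s.2.1, r)
        else (s.1 ++ [(s.2.1, s.2.2)], r, r)) ([], x, x)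
    st.1 ++ [(st.2.1, st.2.2)]

-- ===== PORT B =====
-- literal port of Source B: zip(xs, xs[1:]) → (x::rest).zip rest; the three comprehensions are
-- filter/map; sorted_rows[-1] on the (known nonempty) list → getLastD (default unreachable).
def COND_chunk_consecutive_rows_alt (sorted_rows : List Int) : List (Int × Int) :=
  match sorted_rows with
  | [] => []
  | x :: rest =>
    let breaks := ((x :: rest).zip rest).filter (fun p => p.2 != p.1 + 1)
    let starts := x :: breaks.map Prod.snd
    let ends := breaks.map Prod.fst ++ [(x :: rest).getLastD 0]
    starts.zip ends

-- ===== PRECONDITION & SPEC =====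
def Spec_COND_chunk_consecutive_rows (sorted_rows : List Int) (out : List (Int × Int)) : Prop := out = COND_chunk_consecutive_rows_alt sorted_rows
instance (sorted_rows : List Int) (out : List (Int × Int)) : Decidable (Spec_COND_chunk_consecutive_rows sorted_rows out) := by unfold Spec_COND_chunk_consecutive_rows; infer_instance

-- ===== CLAIM (what is proved, stated in full; the proofs are below) =====
def Claim_equal_COND_chunk_consecutive_rows : Prop := ∀ (sorted_rows : List Int), Dom_COND_chunk_consecutive_rows sorted_rows → Spec_COND_chunk_consecutive_rows sorted_rows (COND_chunk_consecutive_rows sorted_rows)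

-- ===== LEMMAS AND PROOFS =====

-- first run's end, starting from pending value p, scanning l
def pvFe (p : Int) (l : List Int) : Int :=
  match l with
  | [] => p
  | r :: t => if r = p + 1 then pvFe r t else p

-- the runs after the first one
def pvTr (p : Int) (l : List Int) : List (Int × Int) :=
  match l with
  | [] => []
  | r :: t => if r = p + 1 then pvTr r t else (r, pvFe r t) :: pvTr r t

-- A's fold, flushed, equals the accumulated runs followed by the pending run and the rest
theorem pvA_fold (l : List Int) (runs : List (Int × Int)) (s p : Int) :
    (let st := l.foldl (fun (st : List (Int × Int) × Int × Int) r =>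
        if r = st.2.2 + 1 then (st.1, st.2.1, r)
        else (st.1 ++ [(st.2.1, st.2.2)], r, r)) (runs, s, p)
     st.1 ++ [(st.2.1, st.2.2)]) = runs ++ (s, pvFe p l) :: pvTr p l := by
  induction l generalizing runs s p with
  | nil => simp [pvFe, pvTr]
  | cons r t ih =>
    by_cases h : r = p + 1
    · simp only [List.foldl_cons, if_pos h, pvFe, pvTr]
      exact ih runs s r
    · simp only [List.foldl_cons, pvFe, pvTr, if_neg h]
      have := ih (runs ++ [(s, p)]) r r
      simpa using this

-- B equals the same run characterization
theorem pvB_spec (x : Int) (rest : List Int) :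
    COND_chunk_consecutive_rows_alt (x :: rest) = (x, pvFe x rest) :: pvTr x rest := by
  induction rest generalizing x with
  | nil => simp [COND_chunk_consecutive_rows_alt, pvFe, pvTr]
  | cons y t ih =>
    have ihy := ih y
    simp only [COND_chunk_consecutive_rows_alt, List.zip_cons_cons, List.filter_cons,
      List.getLastD_cons] at ihy ⊢
    by_cases h : y = x + 1
    · -- (x, y) is not a break: B for x::y::t and for y::t share breaks and ends
      have hb : ((y != x + 1) = false) := by simp [h]
      rw [hb]
      simp only [Bool.false_eq_true, if_false]
      rw [show pvFe x (y :: t) = pvFe y t by simp [pvFe, h],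
          show pvTr x (y :: t) = pvTr y t by simp [pvTr, h]]
      rcases hF : ((y :: t).zip t).filter (fun p => p.2 != p.1 + 1) with _ | ⟨f, F⟩ <;>
        rw [hF] at ihy ⊢ <;>
        simp only [List.map_nil, List.map_cons, List.nil_append, List.cons_append,
          List.zip_cons_cons, List.zip_nil_right] at ihy ⊢ <;>
      · injection ihy with h1 h2
        injection h1 with _ hbv
        rw [← hbv, ← h2]
    · -- (x, y) is a break: B for x::y::t is (x,x) prepended to B for y::t
      have hb : ((y != x + 1) = true) := by simp [h]
      rw [hb]
      simp only [if_true, List.map_cons, List.cons_append, List.zip_cons_cons]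
      rw [ihy]
      simp [pvFe, pvTr, h]

-- ===== VERDICT (by name: the statement is the Claim_ definition above) =====
theorem COND_chunk_consecutive_rows_spec : Claim_equal_COND_chunk_consecutive_rows := by
  intro sorted_rows _
  unfold Spec_COND_chunk_consecutive_rows
  cases sorted_rows with
  | nil => rfl
  | cons x rest =>
    rw [pvB_spec]
    unfold COND_chunk_consecutive_rows
    simpa using pvA_fold rest [] x x
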